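-- pv_equiv track=rewrite | github.com/young0264/hellopycharm | MISO/2번.py | solution
-- ===== SOURCE A (Python) =====
-- def solution(D, T):
--     # write your code in Python 3.8.10
--     length = len(D)
--     dist = [0] * length
--     dist[0] = D[0] * 2
--     answer = 0
--
--     for i in range(1, length):
--         dist[i] = D[i] * 2 + dist[i - 1]
--
--     dp = [[0] * length for _ in range(3)]
--
--     max_p, max_g, max_m = 0, 0, 0
--     for j in range(length):
--         p, g, m = 0, 0, 0  # 각 열마다 p,g,m 갯수세기
--         for k in T[j]:
--             if k == 'P':
--                 p += 1
--             elif k == 'G':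
--                 g += 1
--             elif k == 'M':
--                 m += 1
--         # 알파벳이 나올때만 초기화
--         if p:
--             dp[0][j] = max_p + p
--             max_p += p
--         if g:
--             dp[1][j] = max_g + g
--             max_g += g
--         if m:
--             dp[2][j] = max_m + m
--             max_m += m
--
--     # 마지막 방문한 곳의 거리 max값 초기화
--     for j in range(length):
--         p, g, m = dp[0][j], dp[1][j], dp[2][j]
--         if p:
--             answer = max(answer, p + dist[j])
--         if g:
--             answer = max(answer, g + dist[j])
--         if m:
--             answer = max(answer, m + dist[j])
--     return answer
--
--     pass
-- ===== SOURCE B (Python) =====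
-- def solution(D, T):
--     cum_dist = 0
--     cum_p = cum_g = cum_m = 0
--     answer = 0
--     for j in range(len(D)):
--         cum_dist += 2 * D[j]
--         col = T[j]
--         p = col.count('P')
--         g = col.count('G')
--         m = col.count('M')
--         if p:
--             cum_p += p
--             answer = max(answer, cum_p + cum_dist)
--         if g:
--             cum_g += g
--             answer = max(answer, cum_g + cum_dist)
--         if m:
--             cum_m += m
--             answer = max(answer, cum_m + cum_dist)
--     return answer
-- ===== Notes on version B (the rewrite author's own statement) =====
-- stated objective: simpler
-- what changed: Replaces A's dist array, 3xN dp table and three separate passes (build distances, build table, rescan table) with one fused pass keeping five running scalars (cumulative distance, three cumulative counts, answer), so no intermediate arrays exist at all.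
import Mathlib
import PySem

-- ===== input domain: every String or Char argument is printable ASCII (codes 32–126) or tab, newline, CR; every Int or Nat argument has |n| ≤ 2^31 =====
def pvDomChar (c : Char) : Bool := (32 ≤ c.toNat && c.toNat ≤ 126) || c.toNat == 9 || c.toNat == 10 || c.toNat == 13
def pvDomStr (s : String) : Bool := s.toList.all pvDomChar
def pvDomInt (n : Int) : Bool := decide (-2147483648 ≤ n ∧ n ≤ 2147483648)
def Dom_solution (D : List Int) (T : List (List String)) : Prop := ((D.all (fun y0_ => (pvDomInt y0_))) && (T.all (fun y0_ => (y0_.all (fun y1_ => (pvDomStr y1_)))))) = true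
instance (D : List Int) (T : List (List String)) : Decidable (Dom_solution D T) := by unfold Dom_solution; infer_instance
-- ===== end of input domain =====

-- B replaces A's three passes and O(n) dist/dp arrays with one fused pass over columns
-- keeping five running scalars (objective: simpler, same asymptotic cost).

-- ===== PORT A =====
def solution (D : List Int) (T : List (List String)) : Int :=
  let length := D.length
  let dist0 : List Int := List.replicate length 0
  -- dist[0] = D[0] * 2 : raises IndexError on empty D; Pre_solution excludes that
  let dist1 := PySem.List.pySetD dist0 0 (PySem.List.pyGetD D 0 0 * 2)
  let dist := (PySem.List.pyRange 1 (length : Int) 1).foldl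
      (fun dist i =>
        PySem.List.pySetD dist i
          (PySem.List.pyGetD D i 0 * 2 + PySem.List.pyGetD dist (i - 1) 0)) dist1
  let st := (PySem.List.pyRange 0 (length : Int) 1).foldl
      (fun (s : List Int × List Int × List Int × Int × Int × Int) j =>
        let c := (PySem.List.pyGetD T j []).foldl
            (fun (c : Int × Int × Int) k =>
              if k = "P" then (c.1 + 1, c.2.1, c.2.2)
              else if k = "G" then (c.1, c.2.1 + 1, c.2.2)
              else if k = "M" then (c.1, c.2.1, c.2.2 + 1)
              else c) (0, 0, 0)
        let s1 := if c.1 ≠ 0 then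
            (PySem.List.pySetD s.1 j (s.2.2.2.1 + c.1), s.2.1, s.2.2.1,
             s.2.2.2.1 + c.1, s.2.2.2.2.1, s.2.2.2.2.2) else s
        let s2 := if c.2.1 ≠ 0 then
            (s1.1, PySem.List.pySetD s1.2.1 j (s1.2.2.2.2.1 + c.2.1), s1.2.2.1,
             s1.2.2.2.1, s1.2.2.2.2.1 + c.2.1, s1.2.2.2.2.2) else s1
        if c.2.2 ≠ 0 then
            (s2.1, s2.2.1, PySem.List.pySetD s2.2.2.1 j (s2.2.2.2.2.2 + c.2.2),
             s2.2.2.2.1, s2.2.2.2.2.1, s2.2.2.2.2.2 + c.2.2) else s2)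
      (List.replicate length 0, List.replicate length 0, List.replicate length 0,
       (0 : Int), (0 : Int), (0 : Int))
  (PySem.List.pyRange 0 (length : Int) 1).foldl
      (fun answer j =>
        let p := PySem.List.pyGetD st.1 j 0
        let g := PySem.List.pyGetD st.2.1 j 0
        let m := PySem.List.pyGetD st.2.2.1 j 0
        let answer := if p ≠ 0 then max answer (p + PySem.List.pyGetD dist j 0) else answer
        let answer := if g ≠ 0 then max answer (g + PySem.List.pyGetD dist j 0) else answer
        if m ≠ 0 then max answer (m + PySem.List.pyGetD dist j 0) else answer) 0

-- ===== PORT B =====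
def solution_alt (D : List Int) (T : List (List String)) : Int :=
  ((PySem.List.pyRange 0 (D.length : Int) 1).foldl
    (fun (s : Int × Int × Int × Int × Int) j =>
      let cum_dist := s.1 + 2 * PySem.List.pyGetD D j 0
      let col := PySem.List.pyGetD T j []
      let p : Int := (PySem.List.count col "P" : Int)
      let g : Int := (PySem.List.count col "G" : Int)
      let m : Int := (PySem.List.count col "M" : Int)
      let s := (cum_dist, s.2.1, s.2.2.1, s.2.2.2.1, s.2.2.2.2)
      let s := if p ≠ 0 then
          (s.1, s.2.1 + p, s.2.2.1, s.2.2.2.1, max s.2.2.2.2 (s.2.1 + p + s.1)) else s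
      let s := if g ≠ 0 then
          (s.1, s.2.1, s.2.2.1 + g, s.2.2.2.1, max s.2.2.2.2 (s.2.2.1 + g + s.1)) else s
      if m ≠ 0 then
          (s.1, s.2.1, s.2.2.1, s.2.2.2.1 + m, max s.2.2.2.2 (s.2.2.2.1 + m + s.1)) else s)
    (0, 0, 0, 0, 0)).2.2.2.2

-- ===== PRECONDITION & SPEC =====
-- Pre_ excludes exactly the inputs where the Python A raises IndexError:
-- empty D (dist[0] access) and T shorter than D (T[j] access).
def Pre_solution (D : List Int) (T : List (List String)) : Prop :=
  D ≠ [] ∧ D.length ≤ T.length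
instance (D : List Int) (T : List (List String)) : Decidable (Pre_solution D T) := by
  unfold Pre_solution; infer_instance
def pvWitness_solution : List Int × List (List String) := ([3, 1], [["P", "x"], ["G"]])

def Spec_solution (D : List Int) (T : List (List String)) (out : Int) : Prop := out = solution_alt D T
instance (D : List Int) (T : List (List String)) (out : Int) : Decidable (Spec_solution D T out) := by unfold Spec_solution; infer_instance

-- ===== CLAIM (what is proved, stated in full; the proofs are below) =====
def Claim_equal_solution : Prop := ∀ (D : List Int) (T : List (List String)), Dom_solution D T → Pre_solution D T → Spec_solution D T (solution D T)

-- ===== LEMMAS AND PROOFS =====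
def colAt (T : List (List String)) (j : Nat) : List String := T.getD j []
def cnt (T : List (List String)) (c : String) (j : Nat) : Int :=
  (PySem.List.count (colAt T j) c : Int)
def cumC (T : List (List String)) (c : String) : Nat → Int
  | 0 => 0
  | t + 1 => cumC T c t + cnt T c t
def sd (D : List Int) : Nat → Int
  | 0 => 0
  | t + 1 => sd D t + 2 * D.getD t 0
def ansRef (D : List Int) (T : List (List String)) : Nat → Int
  | 0 => 0
  | t + 1 =>
    let a := ansRef D T t
    let a := if cnt T "P" t ≠ 0 then max a (cumC T "P" t + cnt T "P" t + sd D (t + 1)) else a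
    let a := if cnt T "G" t ≠ 0 then max a (cumC T "G" t + cnt T "G" t + sd D (t + 1)) else a
    if cnt T "M" t ≠ 0 then max a (cumC T "M" t + cnt T "M" t + sd D (t + 1)) else a

theorem countTriple (col : List String) (a b c : Int) :
    col.foldl (fun (x : Int × Int × Int) k =>
      if k = "P" then (x.1 + 1, x.2.1, x.2.2)
      else if k = "G" then (x.1, x.2.1 + 1, x.2.2)
      else if k = "M" then (x.1, x.2.1, x.2.2 + 1) else x) (a, b, c)
    = (a + (PySem.List.count col "P" : Int),
       b + (PySem.List.count col "G" : Int),
       c + (PySem.List.count col "M" : Int)) := by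
  induction col generalizing a b c with
  | nil => simp [PySem.List.count_eq]
  | cons x xs ih =>
    simp only [List.foldl_cons, PySem.List.count_eq] at *
    by_cases hP : x = "P" <;> by_cases hG : x = "G" <;> by_cases hM : x = "M" <;>
      simp [hP, hG, hM, ih] <;> ring_nf

theorem padGetD (f : Nat → Int) (rest : List Int) {j t : Nat} (h : j < t) :
    ((List.range t).map f ++ rest).getD j 0 = f j := by
  rw [List.getD_append _ _ _ _ (by simpa using h), PySem.List.getD_map_range f t j 0 h]

theorem padSet (f : Nat → Int) {t n : Nat} (h : t < n) :
    ((List.range t).map f ++ List.replicate (n - t) 0).set t (f t)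
    = (List.range (t + 1)).map f ++ List.replicate (n - (t + 1)) 0 := by
  have h1 : n - t = (n - (t+1)) + 1 := by omega
  rw [List.set_append, List.range_succ]
  simp [h1, List.replicate_succ]

theorem padKeep (f : Nat → Int) {t n : Nat} (h : t < n) (h0 : f t = 0) :
    (List.range t).map f ++ List.replicate (n - t) 0
    = (List.range (t + 1)).map f ++ List.replicate (n - (t + 1)) 0 := by
  have h1 : n - t = (n - (t+1)) + 1 := by omega
  rw [List.range_succ]
  simp [h1, List.replicate_succ, h0]

theorem altInv (D : List Int) (T : List (List String)) : ∀ t, t ≤ D.length →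
    (PySem.List.pyRange 0 (t : Int) 1).foldl
      (fun (s : Int × Int × Int × Int × Int) j =>
        let cum_dist := s.1 + 2 * PySem.List.pyGetD D j 0
        let col := PySem.List.pyGetD T j []
        let p : Int := (PySem.List.count col "P" : Int)
        let g : Int := (PySem.List.count col "G" : Int)
        let m : Int := (PySem.List.count col "M" : Int)
        let s := (cum_dist, s.2.1, s.2.2.1, s.2.2.2.1, s.2.2.2.2)
        let s := if p ≠ 0 then
            (s.1, s.2.1 + p, s.2.2.1, s.2.2.2.1, max s.2.2.2.2 (s.2.1 + p + s.1)) else s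
        let s := if g ≠ 0 then
            (s.1, s.2.1, s.2.2.1 + g, s.2.2.2.1, max s.2.2.2.2 (s.2.2.1 + g + s.1)) else s
        if m ≠ 0 then
            (s.1, s.2.1, s.2.2.1, s.2.2.2.1 + m, max s.2.2.2.2 (s.2.2.2.1 + m + s.1)) else s)
      (0, 0, 0, 0, 0)
    = (sd D t, cumC T "P" t, cumC T "G" t, cumC T "M" t, ansRef D T t) := by
  intro t ht
  induction t with
  | zero => simp [PySem.List.pyRange_one_eq_nil, sd, cumC, ansRef]
  | succ t ih =>
    have h0 : ((t + 1 : Nat) : Int) = (t : Int) + 1 := by push_cast; ring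
    rw [h0, PySem.List.pyRange_one_succ_right (by positivity), List.foldl_append,
        ih (by omega)]
    simp only [List.foldl_cons, List.foldl_nil, PySem.List.pyGetD_natCast]
    by_cases hP : List.count "P" (T[t]?.getD []) = 0 <;>
    by_cases hG : List.count "G" (T[t]?.getD []) = 0 <;>
    by_cases hM : List.count "M" (T[t]?.getD []) = 0 <;>
      simp [hP, hG, hM, sd, cumC, ansRef, cnt, colAt]

theorem distInv (D : List Int) (hD : D ≠ []) : ∀ t, 1 ≤ t → t ≤ D.length →
    (PySem.List.pyRange 1 (t : Int) 1).foldl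
      (fun dist i => PySem.List.pySetD dist i
          (PySem.List.pyGetD D i 0 * 2 + PySem.List.pyGetD dist (i - 1) 0))
      (PySem.List.pySetD (List.replicate D.length 0) 0 (PySem.List.pyGetD D 0 0 * 2))
    = (List.range t).map (fun j => sd D (j + 1)) ++ List.replicate (D.length - t) 0 := by
  intro t
  induction t with
  | zero => omega
  | succ t ih =>
    intro _ hle
    rcases Nat.eq_zero_or_pos t with h0 | hpos
    · subst h0
      rw [show ((0 + 1 : Nat) : Int) = 1 by norm_num, PySem.List.pyRange_one_eq_nil le_rfl]
      obtain ⟨d, rest, rfl⟩ : ∃ d rest, D = d :: rest := by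
        cases D with
        | nil => exact absurd rfl hD
        | cons d rest => exact ⟨d, rest, rfl⟩
      simp [PySem.List.pySetD_of_nonneg, List.replicate_succ, sd, PySem.List.pyGetD_zero]
      ring_nf
    · have hc : ((t + 1 : Nat) : Int) = (t : Int) + 1 := by push_cast; ring
      rw [hc, PySem.List.pyRange_one_succ_right (by exact_mod_cast hpos), List.foldl_append,
          ih hpos (by omega)]
      simp only [List.foldl_cons, List.foldl_nil]
      have h1 : (t : Int) - 1 = ((t - 1 : Nat) : Int) := by omega
      rw [h1]
      simp only [PySem.List.pySetD_natCast, PySem.List.pyGetD_natCast]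
      rw [padGetD _ _ (by omega : t - 1 < t)]
      have hfv : D.getD t 0 * 2 + sd D ((t - 1) + 1) = sd D (t + 1) := by
        have h2 : (t - 1) + 1 = t := by omega
        rw [h2]
        simp [sd]
        ring
      rw [hfv, padSet (fun j => sd D (j + 1)) (by omega : t < D.length)]

def dpF (T : List (List String)) (c : String) (j : Nat) : Int :=
  if cnt T c j ≠ 0 then cumC T c j + cnt T c j else 0

theorem dpInv (D : List Int) (T : List (List String)) : ∀ t, t ≤ D.length →
    (PySem.List.pyRange 0 (t : Int) 1).foldl
      (fun (s : List Int × List Int × List Int × Int × Int × Int) j =>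
        let c := (PySem.List.pyGetD T j []).foldl
            (fun (c : Int × Int × Int) k =>
              if k = "P" then (c.1 + 1, c.2.1, c.2.2)
              else if k = "G" then (c.1, c.2.1 + 1, c.2.2)
              else if k = "M" then (c.1, c.2.1, c.2.2 + 1)
              else c) (0, 0, 0)
        let s1 := if c.1 ≠ 0 then
            (PySem.List.pySetD s.1 j (s.2.2.2.1 + c.1), s.2.1, s.2.2.1,
             s.2.2.2.1 + c.1, s.2.2.2.2.1, s.2.2.2.2.2) else s
        let s2 := if c.2.1 ≠ 0 then
            (s1.1, PySem.List.pySetD s1.2.1 j (s1.2.2.2.2.1 + c.2.1), s1.2.2.1,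
             s1.2.2.2.1, s1.2.2.2.2.1 + c.2.1, s1.2.2.2.2.2) else s1
        if c.2.2 ≠ 0 then
            (s2.1, s2.2.1, PySem.List.pySetD s2.2.2.1 j (s2.2.2.2.2.2 + c.2.2),
             s2.2.2.2.1, s2.2.2.2.2.1, s2.2.2.2.2.2 + c.2.2) else s2)
      (List.replicate D.length 0, List.replicate D.length 0, List.replicate D.length 0,
       (0 : Int), (0 : Int), (0 : Int))
    = ((List.range t).map (dpF T "P") ++ List.replicate (D.length - t) 0,
       (List.range t).map (dpF T "G") ++ List.replicate (D.length - t) 0,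
       (List.range t).map (dpF T "M") ++ List.replicate (D.length - t) 0,
       cumC T "P" t, cumC T "G" t, cumC T "M" t) := by
  intro t ht
  induction t with
  | zero => simp [PySem.List.pyRange_one_eq_nil, cumC]
  | succ t ih =>
    have hc : ((t + 1 : Nat) : Int) = (t : Int) + 1 := by push_cast; ring
    have htn : t < D.length := by omega
    rw [hc, PySem.List.pyRange_one_succ_right (by positivity), List.foldl_append, ih (by omega)]
    simp only [List.foldl_cons, List.foldl_nil, PySem.List.pyGetD_natCast, countTriple, zero_add,
               PySem.List.pySetD_natCast]
    by_cases hP : (PySem.List.count (T.getD t []) "P" : Int) = 0 <;>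
    by_cases hG : (PySem.List.count (T.getD t []) "G" : Int) = 0 <;>
    by_cases hM : (PySem.List.count (T.getD t []) "M" : Int) = 0 <;>
      simp only [hP, hG, hM, ne_eq, not_true_eq_false, not_false_eq_true, if_true, if_false,
                 ite_true, ite_false] <;>
      simp only [Prod.mk.injEq] <;>
      and_intros <;>
      first
        | rfl
        | (rw [show cumC T "P" t + ((PySem.List.count (T.getD t []) "P") : Int) = dpF T "P" t by
                 simp [dpF, cnt, colAt]; intro h; exact absurd (by exact_mod_cast h) hP, padSet (dpF T "P") htn])
        | (rw [show cumC T "G" t + ((PySem.List.count (T.getD t []) "G") : Int) = dpF T "G" t by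
                 simp [dpF, cnt, colAt]; intro h; exact absurd (by exact_mod_cast h) hG, padSet (dpF T "G") htn])
        | (rw [show cumC T "M" t + ((PySem.List.count (T.getD t []) "M") : Int) = dpF T "M" t by
                 simp [dpF, cnt, colAt]; intro h; exact absurd (by exact_mod_cast h) hM, padSet (dpF T "M") htn])
        | (exact padKeep (dpF T "P") htn (by simp [dpF, cnt, colAt]; intro h; exact absurd (by exact_mod_cast hP) h))
        | (exact padKeep (dpF T "G") htn (by simp [dpF, cnt, colAt]; intro h; exact absurd (by exact_mod_cast hG) h))
        | (exact padKeep (dpF T "M") htn (by simp [dpF, cnt, colAt]; intro h; exact absurd (by exact_mod_cast hM) h))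
        | (simp [cumC, cnt, colAt]; first | exact_mod_cast hP | exact_mod_cast hG | exact_mod_cast hM)

theorem cnt_nonneg (T : List (List String)) (c : String) (j : Nat) : 0 ≤ cnt T c j := by
  simp [cnt]
theorem cumC_nonneg (T : List (List String)) (c : String) : ∀ t, 0 ≤ cumC T c t
  | 0 => le_refl 0
  | t + 1 => by have h1 := cumC_nonneg T c t; have h2 := cnt_nonneg T c t; simp [cumC]; omega

theorem ansInv (D : List Int) (T : List (List String)) : ∀ t, t ≤ D.length →
    (PySem.List.pyRange 0 (t : Int) 1).foldl
      (fun answer j =>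
        let p := PySem.List.pyGetD ((List.range D.length).map (dpF T "P")) j 0
        let g := PySem.List.pyGetD ((List.range D.length).map (dpF T "G")) j 0
        let m := PySem.List.pyGetD ((List.range D.length).map (dpF T "M")) j 0
        let answer := if p ≠ 0 then
          max answer (p + PySem.List.pyGetD ((List.range D.length).map (fun j => sd D (j + 1))) j 0) else answer
        let answer := if g ≠ 0 then
          max answer (g + PySem.List.pyGetD ((List.range D.length).map (fun j => sd D (j + 1))) j 0) else answer
        if m ≠ 0 then
          max answer (m + PySem.List.pyGetD ((List.range D.length).map (fun j => sd D (j + 1))) j 0) else answer)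
      0
    = ansRef D T t := by
  intro t ht
  induction t with
  | zero => simp [PySem.List.pyRange_one_eq_nil, ansRef]
  | succ t ih =>
    have hc : ((t + 1 : Nat) : Int) = (t : Int) + 1 := by push_cast; ring
    have htn : t < D.length := by omega
    have key : ∀ c, cnt T c t ≠ 0 → cumC T c t + cnt T c t ≠ 0 := fun c h => by
      have h1 := cumC_nonneg T c t
      have h2 := cnt_nonneg T c t
      omega
    rw [hc, PySem.List.pyRange_one_succ_right (by positivity), List.foldl_append, ih (by omega)]
    simp only [List.foldl_cons, List.foldl_nil, PySem.List.pyGetD_natCast,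
               PySem.List.getD_map_range _ _ _ _ htn]
    by_cases hP : cnt T "P" t = 0 <;>
    by_cases hG : cnt T "G" t = 0 <;>
    by_cases hM : cnt T "M" t = 0 <;>
      simp [ansRef, dpF, hP, hG, hM, key]

-- ===== VERDICT (by name: the statement is the Claim_ definition above) =====
theorem solution_spec : Claim_equal_solution := by
  intro D T _ hpre
  obtain ⟨hD, -⟩ := hpre
  have hn : 1 ≤ D.length := by
    cases D with
    | nil => exact absurd rfl hD
    | cons d rest => simp
  unfold Spec_solution solution solution_alt
  simp only []
  rw [distInv D hD D.length hn le_rfl, dpInv D T D.length le_rfl, altInv D T D.length le_rfl]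
  simp only [Nat.sub_self, List.replicate_zero, List.append_nil]
  rw [ansInv D T D.length le_rfl]
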